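-- pv_equiv track=rewrite | github.com/cr496352127/comp9021-solutions | final/20t3_final_q1-6/2.py | filtered_sequence
-- ===== SOURCE A (Python) =====
-- def filtered_sequence(L, n):
--     '''
--     Returns a list LL that keeps from L all elements e
--     that are part of a sub-sequence of length at least n.
--
--     All elements of the sub-sequence have the same value as e.
--
--     You can assume that L is a list of valid integers.
--
--     >>> filtered_sequence([], 2)
--     []
--     >>> filtered_sequence([7], 0)
--     [7]
--     >>> filtered_sequence([7], 1)
--     [7]
--     >>> filtered_sequence([7], 2)
--     []
--     >>> filtered_sequence([1, 3, 1, 2, 5, 6, 8, 2], 1)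
--     [1, 3, 1, 2, 5, 6, 8, 2]
--     >>> filtered_sequence([1, 3, 3, 3, 2, 4, 4, 5, 6, 6, 6, 6], 2)
--     [3, 3, 3, 4, 4, 6, 6, 6, 6]
--     >>> filtered_sequence([7, 7, 7, 7, 2, 2, 7, 3, 4, 4, 4, 6, 5], 3)
--     [7, 7, 7, 7, 4, 4, 4]
--     >>> filtered_sequence([1, 1, 1, 1, 5, 5, 1, 1, 1, 1, 5, 5, 5, 5, 5, 6], 4)
--     [1, 1, 1, 1, 1, 1, 1, 1, 5, 5, 5, 5, 5]
--     '''
--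
--     LL = []
--     # INSERT YOUR CODE HERE
--     # If given list L is empty, then return L directly
--     if not L:
--         return LL
--
--     length = len(L)
--     # Use another variables:
--     # current_elem: Mark current element to traverse
--     # current_freq: Mark current frequency of current_elem
--     # Initially, we start traversing from element at index 0, i.e. current_elem = L[0], current_freq = 1
--     current_elem, current_freq = L[0], 1
--
--     # Traverse rest elements
--     for i in range(1, length):
--         # L[i] is equal to current_elem, then add current_freq by 1
--         if L[i] == current_elem:
--             current_freq += 1
--         else:  # Otherwise, we get a break index
--             # If current_freq is greater than or equal to n, then we can add current_freq elems current_elem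
--             # to the result list LL
--             if current_freq >= n:
--                 LL.extend([current_elem] * current_freq)
--
--             # Update the new info of current_elem and current_freq by L[i] and 1 respectively
--             current_elem, current_freq = L[i], 1
--
--     # Finally, check current_freq again
--     # If current_freq is greater than or equal to n, then we can add current_freq elems current_elem
--     # to the result list LL
--     if current_freq >= n:
--         LL.extend([current_elem] * current_freq)
--     return LL
-- ===== SOURCE B (Python) =====
-- def filtered_sequence(L, n):
--     # Dynamic-programming filter: a forward pass gives, per index, the run
--     # length ending there; a backward pass gives the run length starting
--     # there; an element is kept iff (forward + backward - 1) >= n.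
--     f = []
--     prev = None
--     for x in L:
--         f.append(f[-1] + 1 if f and x == prev else 1)
--         prev = x
--     b = []
--     prev = None
--     for x in reversed(L):
--         b.append(b[-1] + 1 if b and x == prev else 1)
--         prev = x
--     b.reverse()
--     return [x for x, fe, be in zip(L, f, b) if fe + be - 1 >= n]
-- ===== Notes on version B (the rewrite author's own statement) =====
-- stated objective: alternative
-- what changed: Replaces A's run-length-encoding accumulator (flush a run when the value changes, plus trailing flush) by a per-element dynamic-programming filter: a forward pass computes the run length ending at each index, a backward pass the run length starting there, and the output is L filtered elementwise by forward+backward-1 >= n.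
import Mathlib
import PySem

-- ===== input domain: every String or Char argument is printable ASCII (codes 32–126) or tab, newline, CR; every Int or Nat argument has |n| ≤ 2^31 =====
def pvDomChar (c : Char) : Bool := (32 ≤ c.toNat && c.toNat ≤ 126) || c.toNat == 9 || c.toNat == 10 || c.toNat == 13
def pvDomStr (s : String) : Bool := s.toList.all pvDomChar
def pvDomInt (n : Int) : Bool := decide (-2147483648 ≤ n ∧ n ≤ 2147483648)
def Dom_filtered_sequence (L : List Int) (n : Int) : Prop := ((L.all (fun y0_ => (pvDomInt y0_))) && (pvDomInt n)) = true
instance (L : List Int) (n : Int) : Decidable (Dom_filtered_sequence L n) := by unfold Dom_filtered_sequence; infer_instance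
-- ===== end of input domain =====

-- B replaces A's run-length-encoding accumulator by a two-pass dynamic-programming
-- filter (run length ending / starting at each index; keep iff their sum - 1 >= n).

-- ===== PORT A =====
-- one loop step of A: if L[i] == current_elem bump the frequency, else flush the
-- pending run (when current_freq >= n) and restart from L[i]
def pvStepA (n : Int) (s : List Int × Int × Int) (y : Int) : List Int × Int × Int :=
  let LL := s.1; let e := s.2.1; let f := s.2.2
  if y = e then (LL, e, f + 1)
  else ((if f ≥ n then LL ++ List.replicate f.toNat e else LL), y, 1)

-- A's final check after the loop
def pvFinishA (n : Int) (s : List Int × Int × Int) : List Int :=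
  if s.2.2 ≥ n then s.1 ++ List.replicate s.2.2.toNat s.2.1 else s.1

def filtered_sequence (L : List Int) (n : Int) : List Int :=
  match L with
  | [] => []
  | x :: rest => pvFinishA n (rest.foldl (pvStepA n) ([], x, 1))

-- ===== PORT B =====
-- B's per-element appended value: `f[-1] + 1 if f and x == prev else 1`
-- (prev is None exactly when the accumulator is still empty)
def pvStepB (prev : Option Int) (cnt : Int) (x : Int) : Int :=
  match prev with
  | some pv => if x = pv then cnt + 1 else 1
  | none => 1

-- B's pass: append pvStepB of each element, carrying prev and the last value
def pvFwdGo (prev : Option Int) (cnt : Int) : List Int → List Int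
  | [] => []
  | x :: xs => let c := pvStepB prev cnt x; c :: pvFwdGo (some x) c xs

def filtered_sequence_alt (L : List Int) (n : Int) : List Int :=
  let f := pvFwdGo none 0 L
  let b := (pvFwdGo none 0 L.reverse).reverse
  ((L.zip (f.zip b)).filter (fun p => p.2.1 + p.2.2 - 1 ≥ n)).map (fun p => p.1)

-- ===== PRECONDITION & SPEC =====
def Spec_filtered_sequence (L : List Int) (n : Int) (out : List Int) : Prop := out = filtered_sequence_alt L n
instance (L : List Int) (n : Int) (out : List Int) : Decidable (Spec_filtered_sequence L n out) := by unfold Spec_filtered_sequence; infer_instance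

-- ===== CLAIM (what is proved, stated in full; the proofs are below) =====
def Claim_equal_filtered_sequence : Prop := ∀ (L : List Int) (n : Int), Dom_filtered_sequence L n → Spec_filtered_sequence L n (filtered_sequence L n)

-- ===== LEMMAS AND PROOFS =====

-- the maximal runs of L as (value, count) pairs: the common middle ground of both proofs
def pvRuns : List Int → List (Int × Nat)
  | [] => []
  | x :: rest =>
      (x, (rest.takeWhile (· == x)).length + 1) :: pvRuns (rest.dropWhile (· == x))
  termination_by L => L.length
  decreasing_by
    simp only [List.length_cons]
    exact Nat.lt_succ_of_le (List.length_dropWhile_le _ _)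

-- runs kept iff length >= n, flattened
def pvRunFilter (L : List Int) (n : Int) : List Int :=
  (pvRuns L).flatMap (fun p => if (p.2 : Int) ≥ n then List.replicate p.2 p.1 else [])

def pvAsc (k : Nat) : List Int := (List.range k).map (fun (i : Nat) => (i : Int) + 1)

-- peel the first element off a map over a range
theorem pvRange_map_succ (j : Nat) (f : Nat → Int) :
    (List.range (j + 1)).map f = f 0 :: (List.range j).map (fun i => f (i + 1)) := by
  rw [List.range_succ_eq_map, List.map_cons, List.map_map]
  rfl


theorem pvRuns_nil : pvRuns [] = [] := by rw [pvRuns.eq_def]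

theorem pvRuns_cons (x : Int) (rest : List Int) :
    pvRuns (x :: rest) = (x, (rest.takeWhile (· == x)).length + 1) :: pvRuns (rest.dropWhile (· == x)) := by
  rw [pvRuns.eq_def]

-- pvRunFilter on a nonempty list: the head run, filtered, followed by the remainder
theorem pvRF_cons (n x : Int) (rest : List Int) :
    pvRunFilter (x :: rest) n =
      (if (1 : Int) + ((rest.takeWhile (· == x)).length : Int) ≥ n
        then List.replicate ((1 : Int) + ((rest.takeWhile (· == x)).length : Int)).toNat x
        else [])
      ++ pvRunFilter (rest.dropWhile (· == x)) n := by
  rw [pvRunFilter, pvRuns_cons, List.flatMap_cons, pvRunFilter]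
  congr 1
  by_cases hc : (((rest.takeWhile (· == x)).length + 1 : Nat) : Int) ≥ n
  · rw [if_pos hc, if_pos (by push_cast at hc ⊢; omega)]
    congr 1
    omega
  · rw [if_neg hc, if_neg (by push_cast at hc ⊢; omega)]

-- ===== A = pvRunFilter =====

-- loop invariant: running A's loop from state (LL, x, f) (f > 0) over the remaining
-- list and flushing equals LL ++ the filtered current run ++ pvRunFilter on the rest
theorem pvMainA (n : Int) (L : List Int) : ∀ (x : Int) (LL : List Int) (f : Int), 0 < f →
    pvFinishA n (L.foldl (pvStepA n) (LL, x, f)) =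
      LL ++ (if f + ((L.takeWhile (· == x)).length : Int) ≥ n
              then List.replicate (f + ((L.takeWhile (· == x)).length : Int)).toNat x
              else [])
         ++ pvRunFilter (L.dropWhile (· == x)) n := by
  induction L with
  | nil =>
      intro x LL f hf
      simp only [List.foldl_nil, List.takeWhile_nil, List.dropWhile_nil, List.length_nil,
        pvRunFilter, pvRuns_nil, List.flatMap_nil, List.append_nil, pvFinishA]
      push_cast
      split_ifs <;> simp_all
      omega
  | cons y rest ih =>
      intro x LL f hf
      by_cases h : y = x
      · subst h
        simp only [List.foldl_cons, pvStepA, ite_true]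
        rw [ih y LL (f + 1) (by omega)]
        simp only [List.takeWhile_cons, beq_self_eq_true, List.dropWhile_cons,
          if_true, List.length_cons]
        have hcast : f + 1 + ((rest.takeWhile (· == y)).length : Int)
            = f + (((rest.takeWhile (· == y)).length + 1 : Nat) : Int) := by push_cast; ring
        rw [hcast]
      · have hb : (y == x) = false := by simp [h]
        simp only [List.foldl_cons, pvStepA]
        rw [if_neg h]
        rw [ih y _ 1 (by omega)]
        simp only [List.takeWhile_cons, List.dropWhile_cons, hb, Bool.false_eq_true,
          if_false, List.length_nil]
        rw [pvRF_cons]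
        split_ifs <;> simp [List.append_assoc] <;> omega

-- ===== B = pvRunFilter =====

-- the state prev carried by pvFwdGo after a list (initial prev p)
def pvLastO (p : Option Int) : List Int → Option Int
  | [] => p
  | y :: ys => pvLastO (some y) ys

-- inside a run the counter just ascends
theorem pvFwdGo_run (j : Nat) : ∀ (x c : Int) (d : List Int),
    pvFwdGo (some x) c (List.replicate j x ++ d) =
      (List.range j).map (fun (i : Nat) => c + 1 + (i : Int)) ++ pvFwdGo (some x) (c + j) d := by
  induction j with
  | zero => intro x c d; simp
  | succ j ih =>
      intro x c d
      have hstep : pvStepB (some x) c x = c + 1 := by simp [pvStepB]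
      simp only [List.replicate_succ, List.cons_append, pvFwdGo, hstep]
      rw [ih x (c + 1) d, pvRange_map_succ, List.cons_append]
      congr 1
      · norm_num
      congr 1
      · refine List.map_congr_left ?_
        intro a _
        push_cast
        ring
      · congr 1
        push_cast
        ring

-- a run boundary resets the pass: the carried state is irrelevant
theorem pvFwdGo_reset (d : List Int) (x : Int) (c : Int)
    (h : ∀ y, d.head? = some y → y ≠ x) :
    pvFwdGo (some x) c d = pvFwdGo none 0 d := by
  cases d with
  | nil => rfl
  | cons y ys =>
      have hy : y ≠ x := h y rfl
      simp [pvFwdGo, pvStepB, hy]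

-- a trailing run appends an ascending tail (needed for the backward pass)
theorem pvFwdGo_trailing (u : List Int) : ∀ (p : Option Int) (c : Int) (k : Nat) (x : Int),
    pvLastO p u ≠ some x →
    pvFwdGo p c (u ++ List.replicate k x) = pvFwdGo p c u ++ pvAsc k := by
  induction u with
  | nil =>
      intro p c k x hp
      cases k with
      | zero => simp [pvAsc, pvFwdGo]
      | succ j =>
          have hstep : pvStepB p c x = 1 := by
            cases p with
            | none => rfl
            | some pv =>
                have hx : x ≠ pv := by
                  intro h; exact hp (by simp [pvLastO, h])
                simp [pvStepB, hx]
          simp only [List.nil_append, List.replicate_succ, pvFwdGo, hstep]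
          rw [← List.append_nil (List.replicate j x), pvFwdGo_run j x 1 []]
          simp only [pvFwdGo, List.append_nil, pvAsc]
          rw [pvRange_map_succ]
          refine List.cons_eq_cons.mpr ⟨by norm_num, ?_⟩
          refine List.map_congr_left ?_
          intro a _
          push_cast
          ring
  | cons a u' ih =>
      intro p c k x hp
      simp only [List.cons_append, pvFwdGo]
      rw [ih (some a) (pvStepB p c a) k x hp]

theorem pvLastO_or (u : List Int) : ∀ p, pvLastO p u = u.getLast?.or p := by
  induction u with
  | nil => intro p; simp [pvLastO]
  | cons a u' ih =>
      intro p
      rw [pvLastO, ih (some a)]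
      cases u' with
      | nil => simp
      | cons b u'' =>
          have h1 : ((b :: u'').getLast?).isSome := by
            rw [List.getLast?_isSome]
            simp
          rw [List.getLast?_cons_cons, Option.or_of_isSome h1, Option.or_of_isSome h1]

-- head of dropWhile fails the predicate
theorem pvHead_dropWhile (rest : List Int) (x : Int) :
    ∀ y, (rest.dropWhile (· == x)).head? = some y → y ≠ x := by
  induction rest with
  | nil => intro y h; simp at h
  | cons a l ih =>
      intro y h
      by_cases ha : a = x
      · rw [List.dropWhile_cons] at h
        simp only [ha, beq_self_eq_true, if_true] at h
        exact ih y h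
      · rw [List.dropWhile_cons] at h
        simp only [beq_iff_eq, ha, if_false, List.head?_cons, Option.some.injEq] at h
        subst h
        exact ha

-- x :: its takeWhile block is a replicate
theorem pvRun_replicate (rest : List Int) (x : Int) :
    x :: rest.takeWhile (· == x) = List.replicate ((rest.takeWhile (· == x)).length + 1) x := by
  rw [List.replicate_succ]
  congr 1
  apply List.eq_replicate_of_mem
  intro b hb
  have := List.mem_takeWhile_imp hb
  simpa using this

-- descending view of the reversed ascending list
theorem pvAsc_reverse (k : Nat) :
    (pvAsc k).reverse = (List.range k).map (fun (i : Nat) => (k : Int) - (i : Int)) := by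
  apply List.ext_getElem
  · simp [pvAsc]
  · intro i h1 h2
    have hik : i < k := by simpa using h2
    simp only [pvAsc, List.getElem_reverse, List.getElem_map, List.getElem_range,
      List.length_map, List.length_range]
    omega

-- the filtered head run: all kept or all dropped
theorem pvPrefix_filter (k : Nat) (x n : Int) :
    (((List.replicate k x).zip ((pvAsc k).zip ((pvAsc k).reverse))).filter
        (fun p => p.2.1 + p.2.2 - 1 ≥ n)).map (fun p => p.1)
      = if (k : Int) ≥ n then List.replicate k x else [] := by
  rw [pvAsc_reverse]
  have hrep : List.replicate k x = (List.range k).map (fun (_ : Nat) => x) := by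
    simp [List.map_const']
  rw [pvAsc, List.zip_map', hrep, List.zip_map', List.filter_map, List.map_map]
  by_cases hk : (k : Int) ≥ n
  · rw [if_pos hk, List.filter_eq_self.mpr ?_]
    · exact List.map_congr_left (fun a _ => rfl)
    · intro a _
      simp only [Function.comp_apply, decide_eq_true_eq]
      omega
  · rw [if_neg hk, List.filter_eq_nil_iff.mpr ?_, List.map_nil]
    intro a _
    simp only [Function.comp_apply, decide_eq_true_eq]
    omega

-- B on a nonempty list peels off the head run
theorem pvMainB (N : Nat) : ∀ (L : List Int), L.length ≤ N → ∀ (n : Int),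
    filtered_sequence_alt L n = pvRunFilter L n := by
  induction N with
  | zero =>
      intro L hL n
      have hnil : L = [] := List.eq_nil_of_length_eq_zero (Nat.le_zero.mp hL)
      subst hnil
      simp [filtered_sequence_alt, pvRunFilter, pvRuns_nil, pvFwdGo]
  | succ N ih =>
      intro L hL n
      cases L with
      | nil => simp [filtered_sequence_alt, pvRunFilter, pvRuns_nil, pvFwdGo]
      | cons x rest =>
          have hsplit : x :: rest
              = List.replicate ((rest.takeWhile (· == x)).length + 1) x ++ rest.dropWhile (· == x) := by
            rw [← pvRun_replicate, List.cons_append, List.takeWhile_append_dropWhile]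
          -- forward pass
          have hfwd : pvFwdGo none 0 (x :: rest)
              = pvAsc ((rest.takeWhile (· == x)).length + 1) ++ pvFwdGo none 0 (rest.dropWhile (· == x)) := by
            conv_lhs => rw [hsplit]
            rw [List.replicate_succ, List.cons_append]
            have hstep : pvStepB none 0 x = 1 := rfl
            simp only [pvFwdGo, hstep]
            rw [pvFwdGo_run (rest.takeWhile (· == x)).length x 1 (rest.dropWhile (· == x)),
              pvFwdGo_reset _ x _ (pvHead_dropWhile rest x)]
            rw [pvAsc, pvRange_map_succ, List.cons_append]
            refine List.cons_eq_cons.mpr ⟨by norm_num, ?_⟩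
            refine congrArg₂ _ ?_ rfl
            refine List.map_congr_left ?_
            intro a _
            push_cast
            ring
          -- backward pass
          have hlast : pvLastO none (rest.dropWhile (· == x)).reverse ≠ some x := by
            rw [pvLastO_or, List.getLast?_reverse]
            cases hh : (rest.dropWhile (· == x)).head? with
            | none => simp
            | some y =>
                have := pvHead_dropWhile rest x y hh
                simp [this]
          have hbwd : (pvFwdGo none 0 (x :: rest).reverse).reverse
              = (pvAsc ((rest.takeWhile (· == x)).length + 1)).reverse
                ++ (pvFwdGo none 0 (rest.dropWhile (· == x)).reverse).reverse := by
            have hrev : (x :: rest).reverse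
                = (rest.dropWhile (· == x)).reverse
                  ++ List.replicate ((rest.takeWhile (· == x)).length + 1) x := by
              rw [hsplit, List.reverse_append, List.reverse_replicate]
            rw [hrev, pvFwdGo_trailing _ none 0 _ x hlast, List.reverse_append]
          -- zip splits at the run boundary
          have hlenAsc : (pvAsc ((rest.takeWhile (· == x)).length + 1)).length
              = (rest.takeWhile (· == x)).length + 1 := by simp [pvAsc]
          have hzipL : (x :: rest).zip
                ((pvFwdGo none 0 (x :: rest)).zip ((pvFwdGo none 0 (x :: rest).reverse).reverse))
              = (List.replicate ((rest.takeWhile (· == x)).length + 1) x).zip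
                  ((pvAsc ((rest.takeWhile (· == x)).length + 1)).zip
                    ((pvAsc ((rest.takeWhile (· == x)).length + 1)).reverse))
                ++ (rest.dropWhile (· == x)).zip
                    ((pvFwdGo none 0 (rest.dropWhile (· == x))).zip
                      ((pvFwdGo none 0 (rest.dropWhile (· == x)).reverse).reverse)) := by
            rw [hfwd, hbwd, List.zip_append (by simp [hlenAsc])]
            conv_lhs => rw [hsplit]
            rw [List.zip_append (by simp [hlenAsc])]
          have hdlen : (rest.dropWhile (· == x)).length ≤ N := by
            have h1 : (rest.dropWhile (· == x)).length ≤ rest.length := List.length_dropWhile_le _ _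
            simp only [List.length_cons] at hL
            omega
          have hihd := ih (rest.dropWhile (· == x)) hdlen n
          simp only [filtered_sequence_alt] at hihd ⊢
          rw [hzipL, List.filter_append, List.map_append, pvPrefix_filter, hihd, pvRF_cons]
          congr 1
          by_cases hc : (((rest.takeWhile (· == x)).length + 1 : Nat) : Int) ≥ n
          · rw [if_pos hc, if_pos (by push_cast at hc ⊢; omega)]
            congr 1
            omega
          · rw [if_neg hc, if_neg (by push_cast at hc ⊢; omega)]

-- ===== VERDICT (by name: the statement is the Claim_ definition above) =====
theorem filtered_sequence_spec : Claim_equal_filtered_sequence := by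
  unfold Claim_equal_filtered_sequence
  intro L n _
  unfold Spec_filtered_sequence
  rw [pvMainB L.length L (le_refl _) n]
  cases L with
  | nil => simp [filtered_sequence, pvRunFilter, pvRuns_nil]
  | cons x rest =>
      rw [filtered_sequence, pvMainA n rest x [] 1 (by omega), pvRF_cons]
      simp
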